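-- pv_equiv track=rewrite | github.com/Activision/cwl-data | tools/compute-akds.py | aggregate_teams_adjusted_kills_deaths
-- ===== SOURCE A (Python) =====
-- def aggregate_teams_adjusted_kills_deaths(players):
--     teams = {}
--     for stats in players.values():
--         if stats[0] not in teams:
--             teams[stats[0]] = [stats[1], stats[2]]
--         else:
--             teams[stats[0]][0] += stats[1]
--             teams[stats[0]][1] += stats[2]
--
--     return teams
-- ===== SOURCE B (Python) =====
-- def aggregate_teams_adjusted_kills_deaths(players):
--     groups = {}
--     for stats in players.values():
--         groups.setdefault(stats[0], []).append(stats)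
--     return {team: [sum(s[1] for s in members), sum(s[2] for s in members)]
--             for team, members in groups.items()}
-- ===== Notes on version B (the rewrite author's own statement) =====
-- stated objective: alternative
-- what changed: Replaces A's incremental in-place accumulation into a mutable [kills, deaths] list per team with a group-by pass (setdefault/append of full stat tuples per team) followed by a dict comprehension that sums each group's kills and deaths.
import Mathlib
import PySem

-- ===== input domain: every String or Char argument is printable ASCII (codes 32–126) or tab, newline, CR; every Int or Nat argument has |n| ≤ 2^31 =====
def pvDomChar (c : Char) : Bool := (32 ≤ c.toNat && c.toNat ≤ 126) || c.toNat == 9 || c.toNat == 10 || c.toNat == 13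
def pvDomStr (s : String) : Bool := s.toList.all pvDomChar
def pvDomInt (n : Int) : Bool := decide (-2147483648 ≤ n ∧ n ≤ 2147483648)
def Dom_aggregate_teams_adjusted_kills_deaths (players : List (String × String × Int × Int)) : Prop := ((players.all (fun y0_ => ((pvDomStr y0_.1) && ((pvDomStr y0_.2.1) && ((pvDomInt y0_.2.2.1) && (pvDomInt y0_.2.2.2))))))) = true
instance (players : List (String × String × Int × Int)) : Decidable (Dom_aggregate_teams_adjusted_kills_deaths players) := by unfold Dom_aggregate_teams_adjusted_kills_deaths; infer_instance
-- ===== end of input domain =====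

-- B replaces A's incremental per-team [kills, deaths] accumulation with a group-by pass
-- followed by summing each group (alternative decomposition, same cost).

-- ===== PORT A =====
-- one step of A's loop body: the if/else on 'stats[0] not in teams'
def pvAStep (teams : PySem.Dict String (List Int)) (stats : String × Int × Int) :
    PySem.Dict String (List Int) :=
  if teams.contains stats.1 = false then
    teams.insert stats.1 [stats.2.1, stats.2.2]
  else
    -- teams[stats[0]][0] += stats[1]; teams[stats[0]][1] += stats[2]
    let teams := teams.modify stats.1 [] (fun v => PySem.List.pySetD v 0 (PySem.List.pyGetD v 0 0 + stats.2.1))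
    teams.modify stats.1 [] (fun v => PySem.List.pySetD v 1 (PySem.List.pyGetD v 1 0 + stats.2.2))

def aggregate_teams_adjusted_kills_deaths (players : List (String × String × Int × Int)) : List (String × List Int) :=
  (players.foldl (fun teams p => pvAStep teams p.2) PySem.Dict.empty).items

-- ===== PORT B =====
def aggregate_teams_adjusted_kills_deaths_alt (players : List (String × String × Int × Int)) : List (String × List Int) :=
  ((players.foldl (fun (g : PySem.Dict String (List (String × Int × Int))) p =>
      g.modify p.2.1 [] (fun ms => ms ++ [p.2])) PySem.Dict.empty).items).map (fun tm =>
    (tm.1, [(tm.2.map (fun s => s.2.1)).sum, (tm.2.map (fun s => s.2.2)).sum]))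

-- ===== PRECONDITION & SPEC =====
def Spec_aggregate_teams_adjusted_kills_deaths (players : List (String × String × Int × Int)) (out : List (String × List Int)) : Prop := out = aggregate_teams_adjusted_kills_deaths_alt players
instance (players : List (String × String × Int × Int)) (out : List (String × List Int)) : Decidable (Spec_aggregate_teams_adjusted_kills_deaths players out) := by unfold Spec_aggregate_teams_adjusted_kills_deaths; infer_instance

-- ===== CLAIM (what is proved, stated in full; the proofs are below) =====
def Claim_equal_aggregate_teams_adjusted_kills_deaths : Prop := ∀ (players : List (String × String × Int × Int)), Dom_aggregate_teams_adjusted_kills_deaths players → Spec_aggregate_teams_adjusted_kills_deaths players (aggregate_teams_adjusted_kills_deaths players)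

-- ===== LEMMAS AND PROOFS =====

-- the invariant tying A's accumulator to B's groups accumulator
def pvInv (d : PySem.Dict String (List Int)) (g : PySem.Dict String (List (String × Int × Int))) : Prop :=
  d.keys = g.keys ∧ d.keys.Nodup ∧
  ∀ t, d.getD t [] = [((g.getD t []).map (fun s => s.2.1)).sum, ((g.getD t []).map (fun s => s.2.2)).sum]
    ∨ (d.contains t = false ∧ g.getD t [] = [])

theorem pvInv_step (d : PySem.Dict String (List Int)) (g : PySem.Dict String (List (String × Int × Int)))
    (p : String × Int × Int) (h : pvInv d g) :
    pvInv (pvAStep d p) (g.modify p.1 [] (fun ms => ms ++ [p])) := by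
  obtain ⟨hk, hnd, hval⟩ := h
  have hceq : ∀ t, d.contains t = g.contains t := by
    intro t; rw [PySem.Dict.contains_eq_decide_mem_keys, PySem.Dict.contains_eq_decide_mem_keys, hk]
  by_cases hc : d.contains p.1 = false
  · -- p.1 is a fresh key: A inserts, B's modify appends
    have hgc : g.contains p.1 = false := (hceq p.1) ▸ hc
    refine ⟨?_, ?_, ?_⟩
    · rw [pvAStep, if_pos hc, PySem.Dict.keys_insert_of_not_contains d _ hc,
          PySem.Dict.keys_modify, PySem.Dict.keys_insert_of_not_contains g _ hgc, hk]
    · rw [pvAStep, if_pos hc]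
      exact PySem.Dict.nodup_keys_insert d _ _ hnd
    · intro t
      rw [pvAStep, if_pos hc, PySem.Dict.getD_insert, PySem.Dict.getD_modify]
      by_cases ht : t = p.1
      · left
        simp [ht, PySem.Dict.getD_of_not_contains g ([] : List (String × Int × Int)) hgc]
      · simp only [if_neg ht]
        rcases hval t with hv | ⟨hcf, hgf⟩
        · exact Or.inl hv
        · exact Or.inr ⟨by simp [PySem.Dict.contains_insert, ht, hcf], hgf⟩
  · -- p.1 already present: A's two in-place updates, B appends to the member list
    rw [Bool.not_eq_false] at hc
    have hgc : g.contains p.1 = true := (hceq p.1) ▸ hc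
    refine ⟨?_, ?_, ?_⟩
    · rw [pvAStep, if_neg (by simp [hc])]
      rw [PySem.Dict.keys_modify, PySem.Dict.keys_insert_of_contains, PySem.Dict.keys_modify,
          PySem.Dict.keys_insert_of_contains _ _ hc, PySem.Dict.keys_modify,
          PySem.Dict.keys_insert_of_contains _ _ hgc, hk]
      simp [PySem.Dict.contains_modify, hc]
    · rw [pvAStep, if_neg (by simp [hc])]
      have h1 : (d.modify p.1 [] (fun v => PySem.List.pySetD v 0 (PySem.List.pyGetD v 0 0 + p.2.1))).keys.Nodup := by
        rw [PySem.Dict.keys_modify]; exact PySem.Dict.nodup_keys_insert _ _ _ hnd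
      rw [PySem.Dict.keys_modify]; exact PySem.Dict.nodup_keys_insert _ _ _ h1
    · intro t
      rw [pvAStep, if_neg (by simp [hc])]
      simp only [PySem.Dict.getD_modify]
      by_cases ht : t = p.1
      · left
        rcases hval p.1 with hv | ⟨hcf, _⟩
        · simp only [ht, hv]
          simp [PySem.List.pySetD, PySem.List.pySet?, PySem.List.pyGetD, PySem.List.pyGet?,
                PySem.List.pyIdx?]
        · rw [hcf] at hc; cases hc
      · simp only [if_neg ht]
        rcases hval t with hv | ⟨hcf, hgf⟩
        · exact Or.inl hv
        · exact Or.inr ⟨by simp [PySem.Dict.contains_modify, ht, hcf], hgf⟩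

theorem pvInv_fold (l : List (String × String × Int × Int))
    (d : PySem.Dict String (List Int)) (g : PySem.Dict String (List (String × Int × Int)))
    (h : pvInv d g) :
    pvInv (l.foldl (fun teams p => pvAStep teams p.2) d)
          (l.foldl (fun g p => g.modify p.2.1 [] (fun ms => ms ++ [p.2])) g) := by
  induction l generalizing d g with
  | nil => exact h
  | cons x xs ih => exact ih _ _ (pvInv_step d g x.2 h)

-- ===== VERDICT (by name: the statement is the Claim_ definition above) =====
theorem aggregate_teams_adjusted_kills_deaths_spec : Claim_equal_aggregate_teams_adjusted_kills_deaths := by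
  intro players _
  unfold Spec_aggregate_teams_adjusted_kills_deaths
  unfold aggregate_teams_adjusted_kills_deaths aggregate_teams_adjusted_kills_deaths_alt
  have h := pvInv_fold players PySem.Dict.empty PySem.Dict.empty
    ⟨rfl, List.nodup_nil, fun t => Or.inr ⟨rfl, rfl⟩⟩
  obtain ⟨hk, hnd, hval⟩ := h
  set D := players.foldl (fun teams p => pvAStep teams p.2) PySem.Dict.empty with hD
  set G := players.foldl (fun g p => g.modify p.2.1 [] (fun ms => ms ++ [p.2])) PySem.Dict.empty with hG
  rw [PySem.Dict.items_eq_map_keys D hnd [],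
      PySem.Dict.items_eq_map_keys G (hk ▸ hnd) []]
  rw [List.map_map, hk]
  apply List.map_congr_left
  intro t ht
  rcases hval t with hv | ⟨hc, _⟩
  · simp [hv]
  · exfalso
    rw [PySem.Dict.contains_eq_decide_mem_keys, hk] at hc
    simp [ht] at hc
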